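-- pv_equiv track=rewrite | github.com/gityoav/pyg | src/pyg/utils/_notebook2rst.py | _markdown2txt
-- ===== SOURCE A (Python) =====
-- def _markdown2txt(row):
--     if '__' in row:
--         row = ' '.join([word.replace('__', '**') if word.startswith('__') and word.endswith('__') else word for word in row.split(' ')])
--     if row.startswith('###'):
--         txt = row[3:].strip()
--         return '\n%s\n%s\n'%(txt, '-' * len(txt))
--     elif row.startswith('##'):
--         txt = row[2:].strip()
--         return '\n%s\n%s\n'%(txt, '=' * len(txt))
--     elif row.startswith('#'):
--         txt = row[1:].strip()
--         return '\n%s\n%s\n'%(txt, '*' * len(txt))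
--     elif row.startswith('<br>'):
--         return '\n' + row[4:].strip()
--     elif row.startswith('*'):
--         return '\n' + row
--     else:
--         return row
-- ===== SOURCE B (Python) =====
-- def _markdown2txt(row):
--     if '__' in row:
--         out = []
--         for word in row.split(' '):
--             if word.startswith('__') and word.endswith('__'):
--                 word = word.replace('__', '**')
--             out.append(word)
--         row = ' '.join(out)
--     return _heading(row, 0)
--
--
-- def _heading(row, depth):
--     # peel one leading '#' per recursive call, remembering the depth (at most 3)
--     if depth < 3 and row.startswith('#'):
--         return _heading(row[1:], depth + 1)
--     if depth:
--         txt = row.strip()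
--         return '\n%s\n%s\n' % (txt, '*=-'[depth - 1] * len(txt))
--     if row.startswith('<br>'):
--         return '\n' + row[4:].strip()
--     if row.startswith('*'):
--         return '\n' + row
--     return row
-- ===== Notes on version B (the rewrite author's own statement) =====
-- stated objective: alternative
-- what changed: The sequential three-branch header prefix-test chain is replaced by a recursive helper that peels one leading hash character per call with a depth accumulator (capped at 3) and renders the underline once at the end, and the bold-rewrite comprehension becomes an explicit accumulator loop.
import Mathlib
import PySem

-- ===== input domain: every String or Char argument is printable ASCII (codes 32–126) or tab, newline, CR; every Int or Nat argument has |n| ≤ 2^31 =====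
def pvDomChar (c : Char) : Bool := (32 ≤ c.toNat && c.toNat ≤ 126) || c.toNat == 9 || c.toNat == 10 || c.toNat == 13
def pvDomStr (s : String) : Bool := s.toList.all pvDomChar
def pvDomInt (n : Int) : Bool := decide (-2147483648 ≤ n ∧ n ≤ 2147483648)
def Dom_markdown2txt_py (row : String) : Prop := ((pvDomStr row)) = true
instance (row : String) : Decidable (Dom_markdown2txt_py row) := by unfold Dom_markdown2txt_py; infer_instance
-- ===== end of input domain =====

-- B replaces A's sequential three-branch header prefix-test chain by a recursion that peels one
-- leading '#' per call with a depth accumulator, and the bold-rewrite comprehension by an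
-- explicit accumulator loop (objective: alternative decomposition, same cost).

-- ===== PORT A =====
def markdown2txt_py (row : String) : String :=
  let r :=
    if PySem.Chars.isIn ['_', '_'] row.toList then
      PySem.Chars.join [' ']
        ((PySem.Chars.splitOn row.toList [' ']).map
          (fun w => if PySem.Chars.startswith w ['_', '_'] && PySem.Chars.endswith w ['_', '_']
                    then PySem.Chars.replace w ['_', '_'] ['*', '*'] else w))
    else row.toList
  if PySem.Chars.startswith r ['#', '#', '#'] then
    let txt := PySem.Chars.strip (PySem.Chars.slice r (some 3) none)
    String.ofList ('\n' :: txt ++ '\n' :: List.replicate txt.length '-' ++ ['\n'])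
  else if PySem.Chars.startswith r ['#', '#'] then
    let txt := PySem.Chars.strip (PySem.Chars.slice r (some 2) none)
    String.ofList ('\n' :: txt ++ '\n' :: List.replicate txt.length '=' ++ ['\n'])
  else if PySem.Chars.startswith r ['#'] then
    let txt := PySem.Chars.strip (PySem.Chars.slice r (some 1) none)
    String.ofList ('\n' :: txt ++ '\n' :: List.replicate txt.length '*' ++ ['\n'])
  else if PySem.Chars.startswith r ['<', 'b', 'r', '>'] then
    String.ofList ('\n' :: PySem.Chars.strip (PySem.Chars.slice r (some 4) none))
  else if PySem.Chars.startswith r ['*'] then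
    String.ofList ('\n' :: r)
  else String.ofList r

-- ===== PORT B =====
-- _heading: peel one leading '#' per recursive call (at most 3), remembering the depth
def pvHeading (r : List Char) (depth : Nat) : String :=
  if h : depth < 3 ∧ PySem.Chars.startswith r ['#'] = true then
    pvHeading (PySem.Chars.slice r (some 1) none) (depth + 1)
  else if depth ≠ 0 then
    let txt := PySem.Chars.strip r
    -- '*=-'[depth - 1]: in this branch depth ∈ {1,2,3}, so the pyGet? is always some
    let ch := (PySem.List.pyGet? ['*', '=', '-'] ((depth : Int) - 1)).getD '-'
    String.ofList ('\n' :: txt ++ '\n' :: List.replicate txt.length ch ++ ['\n'])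
  else if PySem.Chars.startswith r ['<', 'b', 'r', '>'] then
    String.ofList ('\n' :: PySem.Chars.strip (PySem.Chars.slice r (some 4) none))
  else if PySem.Chars.startswith r ['*'] then
    String.ofList ('\n' :: r)
  else String.ofList r
termination_by 3 - depth
decreasing_by omega

def markdown2txt_py_alt (row : String) : String :=
  let r :=
    if PySem.Chars.isIn ['_', '_'] row.toList then
      PySem.Chars.join [' ']
        ((PySem.Chars.splitOn row.toList [' ']).foldl
          (fun acc w => acc ++
            [if PySem.Chars.startswith w ['_', '_'] && PySem.Chars.endswith w ['_', '_']
             then PySem.Chars.replace w ['_', '_'] ['*', '*'] else w]) [])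
    else row.toList
  pvHeading r 0

-- ===== PRECONDITION & SPEC =====
def Spec_markdown2txt_py (row : String) (out : String) : Prop := out = markdown2txt_py_alt row
instance (row : String) (out : String) : Decidable (Spec_markdown2txt_py row out) := by unfold Spec_markdown2txt_py; infer_instance

-- ===== CLAIM =====
def Claim_equal_markdown2txt_py : Prop := ∀ (row : String), Dom_markdown2txt_py row → Spec_markdown2txt_py row (markdown2txt_py row)

-- ===== LEMMAS AND PROOFS =====

-- slice specializations of PySem.List.slice_from used to evaluate row[1:], row[2:], row[3:]
theorem pv_slice1 (xs : List Char) : PySem.List.slice xs (some 1) none = List.drop 1 xs := by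
  simpa using PySem.List.slice_from xs (a := 1) (by norm_num)
theorem pv_slice2 (xs : List Char) : PySem.List.slice xs (some 2) none = List.drop 2 xs := by
  simpa using PySem.List.slice_from xs (a := 2) (by norm_num)
theorem pv_slice3 (xs : List Char) : PySem.List.slice xs (some 3) none = List.drop 3 xs := by
  simpa using PySem.List.slice_from xs (a := 3) (by norm_num)

-- the peeling recursion started at depth 0 computes exactly A's prefix-test chain
theorem pv_heading_eq (r : List Char) :
    pvHeading r 0 =
      (if PySem.Chars.startswith r ['#', '#', '#'] then
        let txt := PySem.Chars.strip (PySem.Chars.slice r (some 3) none)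
        String.ofList ('\n' :: txt ++ '\n' :: List.replicate txt.length '-' ++ ['\n'])
      else if PySem.Chars.startswith r ['#', '#'] then
        let txt := PySem.Chars.strip (PySem.Chars.slice r (some 2) none)
        String.ofList ('\n' :: txt ++ '\n' :: List.replicate txt.length '=' ++ ['\n'])
      else if PySem.Chars.startswith r ['#'] then
        let txt := PySem.Chars.strip (PySem.Chars.slice r (some 1) none)
        String.ofList ('\n' :: txt ++ '\n' :: List.replicate txt.length '*' ++ ['\n'])
      else if PySem.Chars.startswith r ['<', 'b', 'r', '>'] then
        String.ofList ('\n' :: PySem.Chars.strip (PySem.Chars.slice r (some 4) none))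
      else if PySem.Chars.startswith r ['*'] then
        String.ofList ('\n' :: r)
      else String.ofList r) := by
  rcases r with _ | ⟨c1, r1⟩
  · rw [pvHeading]
    simp [PySem.Chars.startswith, List.isPrefixOf]
  by_cases h1 : c1 = '#'
  · subst h1
    rcases r1 with _ | ⟨c2, r2⟩
    · rw [pvHeading, pvHeading]
      simp [PySem.Chars.startswith, List.isPrefixOf, pv_slice1, PySem.List.pyGet?, PySem.List.pyIdx?]
    by_cases h2 : c2 = '#'
    · subst h2
      rcases r2 with _ | ⟨c3, r3⟩
      · rw [pvHeading, pvHeading, pvHeading]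
        simp [PySem.Chars.startswith, List.isPrefixOf, pv_slice1, pv_slice2, PySem.List.pyGet?, PySem.List.pyIdx?]
      by_cases h3 : c3 = '#'
      · subst h3
        rw [pvHeading, pvHeading, pvHeading, pvHeading]
        simp [PySem.Chars.startswith, List.isPrefixOf, pv_slice1, pv_slice3, PySem.List.pyGet?, PySem.List.pyIdx?]
      · rw [pvHeading, pvHeading, pvHeading]
        simp [PySem.Chars.startswith, List.isPrefixOf, Ne.symm h3, pv_slice1, pv_slice2,
          PySem.List.pyGet?, PySem.List.pyIdx?]
    · rw [pvHeading, pvHeading]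
      simp [PySem.Chars.startswith, List.isPrefixOf, Ne.symm h2, pv_slice1,
        PySem.List.pyGet?, PySem.List.pyIdx?]
  · rw [pvHeading]
    simp [PySem.Chars.startswith, List.isPrefixOf, Ne.symm h1]

-- ===== VERDICT =====
theorem markdown2txt_py_spec : Claim_equal_markdown2txt_py := by
  intro row _
  unfold Spec_markdown2txt_py markdown2txt_py markdown2txt_py_alt
  simp only [PySem.List.foldl_append_singleton_eq_map, List.nil_append]
  exact (pv_heading_eq _).symm
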